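-- pv_equiv track=rewrite | github.com/FromNode/FromNode_Project | NodeApp/views.py | filter_axis
-- ===== SOURCE A (Python) =====
-- def filter_axis(child_list, x_value, y_value, coordinate_node_test, i_dict, check):
--
--     if child_list == []:
--         if len(coordinate_node_test) == 20:
--             return
--         else:
--             pass
--             # y_value
--     else:
--         x_value += 1
--         for child in child_list:
--
--             coordinate_node_test.append([x_value, y_value, child])
--             child_list = i_dict.get(child)
--
--             filter_axis(child_list, x_value, y_value,
--                         coordinate_node_test, i_dict, check)
--             y_value += 1
--         is_first = True
--
--     return coordinate_node_test
-- ===== SOURCE B (Python) =====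
-- def filter_axis(child_list, x_value, y_value, coordinate_node_test, i_dict, check):
--     if child_list == []:
--         return None if len(coordinate_node_test) == 20 else coordinate_node_test
--     stack = [(x_value + 1, y_value + i, c) for i, c in enumerate(child_list)]
--     stack.reverse()
--     while stack:
--         x, y, node = stack.pop()
--         coordinate_node_test.append([x, y, node])
--         children = i_dict.get(node)
--         stack.extend(reversed([(x + 1, y + i, c) for i, c in enumerate(children)]))
--     return coordinate_node_test
-- ===== Notes on version B (the rewrite author's own statement) =====
-- stated objective: alternative
-- what changed: The recursive DFS (re-entering filter_axis per child and mutating the shared list) is replaced by a single iterative loop over an explicit stack of (x, y, node) triples, seeded with the enumerated top-level children and pushing each node's children in reverse so pop order preserves the preorder traversal.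
import Mathlib
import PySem

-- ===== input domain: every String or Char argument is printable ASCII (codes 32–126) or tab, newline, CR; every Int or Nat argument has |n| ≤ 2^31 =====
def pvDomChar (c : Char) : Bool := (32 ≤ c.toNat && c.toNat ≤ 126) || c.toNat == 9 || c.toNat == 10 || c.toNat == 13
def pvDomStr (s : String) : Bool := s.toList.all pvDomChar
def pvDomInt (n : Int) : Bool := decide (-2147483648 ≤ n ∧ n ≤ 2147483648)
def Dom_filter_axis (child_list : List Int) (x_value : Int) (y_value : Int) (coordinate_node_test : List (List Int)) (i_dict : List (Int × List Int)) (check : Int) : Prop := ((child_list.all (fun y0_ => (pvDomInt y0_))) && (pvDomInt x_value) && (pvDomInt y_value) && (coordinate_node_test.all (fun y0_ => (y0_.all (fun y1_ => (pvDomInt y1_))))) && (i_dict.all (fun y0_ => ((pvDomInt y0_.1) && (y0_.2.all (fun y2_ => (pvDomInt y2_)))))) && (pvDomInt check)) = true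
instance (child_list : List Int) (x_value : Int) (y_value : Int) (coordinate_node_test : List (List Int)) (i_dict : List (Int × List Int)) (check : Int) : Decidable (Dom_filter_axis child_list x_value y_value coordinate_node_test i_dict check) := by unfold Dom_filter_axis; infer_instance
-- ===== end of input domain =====

-- B rewrites A's recursive DFS as one explicit-stack loop (same values, same in-place appends to
-- coordinate_node_test; the equivalence proved here is about the RETURN value).

-- ===== PORT A =====
-- first-match lookup: exact port of Python's i_dict.get(child) (dicts arrive as assoc lists)
def pvGet : List (Int × List Int) → Int → Option (List Int)
  | [], _ => none
  | (k, v) :: rest, c => if k == c then some v else pvGet rest c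

-- A's recursion, with a fuel counter as a totality guard (Python A recurses without bound on
-- cyclic dicts; Pre_ bounds the recursion depth by i_dict.length, so fuel i_dict.length+1 is never
-- the reason a `none` is returned inside Pre_).  The recursive Python call's RETURN value is
-- ignored and only the mutated accumulator matters, so the helper returns the updated accumulator
-- (`none` = TypeError on iterating None, or fuel exhaustion).
mutual
def goA : Nat → Option (List Int) → Int → Int → List (List Int) → List (Int × List Int) → Option (List (List Int))
  | 0, _, _, _, _, _ => none
  | _ + 1, none, _, _, _, _ => none        -- `for child in None`: TypeError
  | fuel + 1, some l, x, y, acc, d =>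
      if l = [] then some acc              -- `return`/`return coordinate_node_test`: caller ignores it, acc unchanged
      else loopA fuel l (x + 1) y acc d    -- x_value += 1, then the for-loop
  termination_by fuel _ _ _ _ _ => (fuel, 0)
def loopA : Nat → List Int → Int → Int → List (List Int) → List (Int × List Int) → Option (List (List Int))
  | _, [], _, _, acc, _ => some acc
  | fuel, c :: rest, x, y, acc, d =>
      match goA fuel (pvGet d c) x y (acc ++ [[x, y, c]]) d with
      | none => none
      | some acc2 => loopA fuel rest x (y + 1) acc2 d   -- y_value += 1
  termination_by fuel l _ _ _ _ => (fuel, l.length + 1)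
end

def filter_axis (child_list : List Int) (x_value : Int) (y_value : Int) (coordinate_node_test : List (List Int)) (i_dict : List (Int × List Int)) (check : Int) : Option (List (List Int)) :=
  if child_list = [] then
    if coordinate_node_test.length = 20 then none else some coordinate_node_test
  else loopA (i_dict.length + 1) child_list (x_value + 1) y_value coordinate_node_test i_dict

-- ===== PORT B =====
-- '[(x, y+i, c) for i, c in enumerate(children)]'; Python pushes it REVERSED onto an end-top
-- stack, modeled exactly as a head-top stack with the in-order block prepended (same pop order).
def pvEnumStack (x y : Int) : List Int → List (Int × Int × Int)
  | [] => []
  | c :: rest => (x, y, c) :: pvEnumStack x (y + 1) rest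

def pvMaxLen (d : List (Int × List Int)) : Nat := d.foldr (fun p m => max p.2.length m) 0

-- the while-loop; fuel is a totality guard only (inside Pre_ the visit count is below it)
def goB : Nat → List (Int × Int × Int) → List (List Int) → List (Int × List Int) → Option (List (List Int))
  | _, [], acc, _ => some acc
  | 0, _ :: _, _, _ => none
  | fuel + 1, (x, y, node) :: stack, acc, d =>
      match pvGet d node with
      | none => none                        -- enumerate(None): TypeError
      | some children => goB fuel (pvEnumStack (x + 1) y children ++ stack) (acc ++ [[x, y, node]]) d

def filter_axis_alt (child_list : List Int) (x_value : Int) (y_value : Int) (coordinate_node_test : List (List Int)) (i_dict : List (Int × List Int)) (check : Int) : Option (List (List Int)) :=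
  if child_list = [] then
    if coordinate_node_test.length = 20 then none else some coordinate_node_test
  else goB (child_list.length * (pvMaxLen i_dict + 1) ^ i_dict.length + 1)
           (pvEnumStack (x_value + 1) y_value child_list) coordinate_node_test i_dict

-- ===== PRECONDITION & SPEC =====
-- reachability closure of the i_dict graph, used only to STATE which inputs make A raise:
-- succsD c = the children list i_dict.get(c) yields (empty when the key is missing)
def succsD (d : List (Int × List Int)) (c : Int) : List Int := (pvGet d c).getD []
def stepR (d : List (Int × List Int)) (s : List Int) : List Int :=
  (s ++ s.flatMap (succsD d)).dedup
def reachN (d : List (Int × List Int)) : Nat → List Int → List Int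
  | 0, s => s.dedup
  | n + 1, s => stepR d (reachN d n s)
-- after rbound steps the closure is saturated (proved below), so `reach` is THE reachable set
def rbound (d : List (Int × List Int)) (s : List Int) : Nat :=
  (s ++ d.flatMap (fun p => p.2)).dedup.length
def reach (d : List (Int × List Int)) (s : List Int) : List Int := reachN d (rbound d s) s

-- Pre_ excludes EXACTLY the inputs on which Python A raises: with a nonempty child_list, either a
-- node reachable from it is missing from i_dict (TypeError: iterating None) or some reachable node
-- lies on a cycle (unbounded recursion, RecursionError); on every other input A returns a value.
def Pre_filter_axis (child_list : List Int) (x_value : Int) (y_value : Int) (coordinate_node_test : List (List Int)) (i_dict : List (Int × List Int)) (check : Int) : Prop :=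
  child_list = [] ∨
  ((∀ c ∈ reach i_dict child_list, (pvGet i_dict c).isSome = true) ∧
   (∀ c ∈ reach i_dict child_list, c ∉ reach i_dict (succsD i_dict c)))
instance (child_list : List Int) (x_value : Int) (y_value : Int) (coordinate_node_test : List (List Int)) (i_dict : List (Int × List Int)) (check : Int) : Decidable (Pre_filter_axis child_list x_value y_value coordinate_node_test i_dict check) := by unfold Pre_filter_axis; infer_instance

def pvWitness_filter_axis : List Int × Int × Int × List (List Int) × (List (Int × List Int)) × Int :=
  ([1], 0, 0, [], [(1, [2]), (2, [])], 0)

def Spec_filter_axis (child_list : List Int) (x_value : Int) (y_value : Int) (coordinate_node_test : List (List Int)) (i_dict : List (Int × List Int)) (check : Int) (out : Option (List (List Int))) : Prop := out = filter_axis_alt child_list x_value y_value coordinate_node_test i_dict check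
instance (child_list : List Int) (x_value : Int) (y_value : Int) (coordinate_node_test : List (List Int)) (i_dict : List (Int × List Int)) (check : Int) (out : Option (List (List Int))) : Decidable (Spec_filter_axis child_list x_value y_value coordinate_node_test i_dict check out) := by unfold Spec_filter_axis; infer_instance

-- ===== CLAIM (what is proved, stated in full; the proofs are below) =====
def Claim_equal_filter_axis : Prop := ∀ (child_list : List Int) (x_value : Int) (y_value : Int) (coordinate_node_test : List (List Int)) (i_dict : List (Int × List Int)) (check : Int), Dom_filter_axis child_list x_value y_value coordinate_node_test i_dict check → Pre_filter_axis child_list x_value y_value coordinate_node_test i_dict check → Spec_filter_axis child_list x_value y_value coordinate_node_test i_dict check (filter_axis child_list x_value y_value coordinate_node_test i_dict check)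

-- ===== LEMMAS AND PROOFS =====

theorem pvWitness_ok :
    Dom_filter_axis pvWitness_filter_axis.1 pvWitness_filter_axis.2.1 pvWitness_filter_axis.2.2.1 pvWitness_filter_axis.2.2.2.1 pvWitness_filter_axis.2.2.2.2.1 pvWitness_filter_axis.2.2.2.2.2 ∧
    Pre_filter_axis pvWitness_filter_axis.1 pvWitness_filter_axis.2.1 pvWitness_filter_axis.2.2.1 pvWitness_filter_axis.2.2.2.1 pvWitness_filter_axis.2.2.2.2.1 pvWitness_filter_axis.2.2.2.2.2 := by
  decide

-- ---- closure machinery: `reach d s` is saturated and minimal ----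

theorem mem_stepR_iff (d : List (Int × List Int)) (s : List Int) (x : Int) :
    x ∈ stepR d s ↔ x ∈ s ∨ ∃ a ∈ s, x ∈ succsD d a := by
  simp [stepR, List.mem_dedup, List.mem_append, List.mem_flatMap]

theorem reachN_nodup (d : List (Int × List Int)) (n : Nat) (s : List Int) :
    (reachN d n s).Nodup := by
  cases n <;> simp [reachN, stepR, List.nodup_dedup]

theorem mem_reachN_of_mem (d : List (Int × List Int)) (s : List Int) (a : Int)
    (h : a ∈ s) : ∀ n, a ∈ reachN d n s := by
  intro n
  induction n with
  | zero => simpa [reachN, List.mem_dedup] using h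
  | succ n ih => exact (mem_stepR_iff d _ a).2 (Or.inl ih)

theorem reachN_le_succ (d : List (Int × List Int)) (s : List Int) (n : Nat) (x : Int)
    (h : x ∈ reachN d n s) : x ∈ reachN d (n + 1) s :=
  (mem_stepR_iff d _ x).2 (Or.inl h)

theorem stepR_mem_congr (d : List (Int × List Int)) (s t : List Int)
    (h : ∀ x : Int, x ∈ s ↔ x ∈ t) (x : Int) : x ∈ stepR d s ↔ x ∈ stepR d t := by
  rw [mem_stepR_iff, mem_stepR_iff]
  constructor
  · rintro (hx | ⟨a, ha, hx⟩)
    · exact Or.inl ((h x).1 hx)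
    · exact Or.inr ⟨a, (h a).1 ha, hx⟩
  · rintro (hx | ⟨a, ha, hx⟩)
    · exact Or.inl ((h x).2 hx)
    · exact Or.inr ⟨a, (h a).2 ha, hx⟩

-- once one step adds nothing, no further step does
theorem stable_add (d : List (Int × List Int)) (s : List Int) (k : Nat)
    (h : ∀ x : Int, x ∈ reachN d (k + 1) s ↔ x ∈ reachN d k s) :
    ∀ m (x : Int), x ∈ reachN d (k + m) s ↔ x ∈ reachN d k s := by
  intro m
  induction m with
  | zero => intro x; rfl
  | succ m ih =>
      intro x
      have : x ∈ reachN d (k + m + 1) s ↔ x ∈ reachN d (k + 1) s :=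
        stepR_mem_congr d _ _ ih x
      rw [show k + (m + 1) = k + m + 1 from rfl, this, h]

theorem pvGet_mem (d : List (Int × List Int)) (c : Int) (v : List Int)
    (h : pvGet d c = some v) : (c, v) ∈ d := by
  induction d with
  | nil => simp [pvGet] at h
  | cons p rest ih =>
      obtain ⟨k, w⟩ := p
      by_cases hk : (k == c) = true
      · simp [pvGet, hk] at h
        simp_all
      · simp only [pvGet, hk] at h
        exact List.mem_cons_of_mem _ (ih h)

theorem pvGet_some_key (d : List (Int × List Int)) (c : Int) (v : List Int)
    (h : pvGet d c = some v) : c ∈ d.map Prod.fst :=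
  List.mem_map.2 ⟨(c, v), pvGet_mem d c v h, rfl⟩

theorem reachN_subset_all (d : List (Int × List Int)) (s : List Int) :
    ∀ n (x : Int), x ∈ reachN d n s → x ∈ s ++ d.flatMap (fun p => p.2) := by
  intro n
  induction n with
  | zero =>
      intro x hx
      exact List.mem_append_left _ ((List.mem_dedup).1 hx)
  | succ n ih =>
      intro x hx
      rcases (mem_stepR_iff d _ x).1 hx with hx | ⟨a, ha, hx⟩
      · exact ih x hx
      · rcases hg : pvGet d a with _ | v
        · simp [succsD, hg] at hx
        · have hv : x ∈ v := by simpa [succsD, hg] using hx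
          exact List.mem_append_right _
            (List.mem_flatMap.2 ⟨(a, v), pvGet_mem d a v hg, hv⟩)

theorem nodup_length_le_dedup {l L : List Int} (h : l.Nodup) (hs : ∀ x ∈ l, x ∈ L) :
    l.length ≤ L.dedup.length := by
  have h1 : l.toFinset.card = l.length := List.toFinset_card_of_nodup h
  have h2 : L.dedup.toFinset.card = L.dedup.length :=
    List.toFinset_card_of_nodup (List.nodup_dedup L)
  have hsub : l.toFinset ⊆ L.dedup.toFinset := by
    intro x hx
    rw [List.mem_toFinset, List.mem_dedup]
    exact hs x (List.mem_toFinset.1 hx)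
  calc l.length = l.toFinset.card := h1.symm
    _ ≤ L.dedup.toFinset.card := Finset.card_le_card hsub
    _ = L.dedup.length := h2

theorem length_reachN_le (d : List (Int × List Int)) (s : List Int) (n : Nat) :
    (reachN d n s).length ≤ rbound d s :=
  nodup_length_le_dedup (reachN_nodup d n s) (reachN_subset_all d s n)

theorem growth (d : List (Int × List Int)) (s : List Int) (k : Nat)
    (h : ¬ ∀ x : Int, x ∈ reachN d (k + 1) s ↔ x ∈ reachN d k s) :
    (reachN d k s).length < (reachN d (k + 1) s).length := by
  obtain ⟨x, hx⟩ := not_forall.1 h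
  have hxin : x ∈ reachN d (k + 1) s ∧ x ∉ reachN d k s := by
    by_cases h1 : x ∈ reachN d k s
    · exact absurd (iff_of_true (reachN_le_succ d s k x h1) h1) hx
    · by_cases h2 : x ∈ reachN d (k + 1) s
      · exact ⟨h2, h1⟩
      · exact absurd (iff_of_false h2 h1) hx
  have hsub : (reachN d k s).toFinset ⊂ (reachN d (k + 1) s).toFinset := by
    constructor
    · intro y hy
      exact List.mem_toFinset.2 (reachN_le_succ d s k y (List.mem_toFinset.1 hy))
    · intro hcon
      exact hxin.2 (List.mem_toFinset.1 (hcon (List.mem_toFinset.2 hxin.1)))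
  have := Finset.card_lt_card hsub
  rwa [List.toFinset_card_of_nodup (reachN_nodup d k s),
       List.toFinset_card_of_nodup (reachN_nodup d (k + 1) s)] at this

theorem stable_at_bound (d : List (Int × List Int)) (s : List Int) :
    ∀ x : Int, x ∈ reachN d (rbound d s + 1) s ↔ x ∈ reachN d (rbound d s) s := by
  by_cases hstab : ∃ j ≤ rbound d s, ∀ x : Int, x ∈ reachN d (j + 1) s ↔ x ∈ reachN d j s
  · obtain ⟨j, hj, hP⟩ := hstab
    intro x
    have h1 := stable_add d s j hP (rbound d s - j) x
    have h2 := stable_add d s j hP (rbound d s - j + 1) x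
    rw [show j + (rbound d s - j) = rbound d s by omega] at h1
    rw [show j + (rbound d s - j + 1) = rbound d s + 1 by omega] at h2
    rw [h2, ← h1]
  · exfalso
    have hns : ∀ k, k ≤ rbound d s → ¬ ∀ x : Int, x ∈ reachN d (k + 1) s ↔ x ∈ reachN d k s := by
      intro k hk hP
      exact hstab ⟨k, hk, hP⟩
    have key : ∀ k, k ≤ rbound d s + 1 → k ≤ (reachN d k s).length := by
      intro k
      induction k with
      | zero => omega
      | succ k ih =>
          intro hk
          have h1 := ih (by omega)
          have h2 := growth d s k (hns k (by omega))
          omega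
    have := key (rbound d s + 1) le_rfl
    have := length_reachN_le d s (rbound d s + 1)
    omega

theorem reach_nodup (d : List (Int × List Int)) (s : List Int) : (reach d s).Nodup :=
  reachN_nodup d _ s

theorem reach_closed (d : List (Int × List Int)) (s : List Int) (a b : Int)
    (ha : a ∈ reach d s) (hb : b ∈ succsD d a) : b ∈ reach d s := by
  have : b ∈ reachN d (rbound d s + 1) s :=
    (mem_stepR_iff d _ b).2 (Or.inr ⟨a, ha, hb⟩)
  exact (stable_at_bound d s b).1 this

theorem reach_self (d : List (Int × List Int)) (s : List Int) (a : Int) (h : a ∈ s) :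
    a ∈ reach d s := mem_reachN_of_mem d s a h _

theorem reach_minimal (d : List (Int × List Int)) (t : List Int) (C : List Int)
    (hC : ∀ a ∈ C, ∀ b ∈ succsD d a, b ∈ C) (ht : ∀ a ∈ t, a ∈ C) :
    ∀ x ∈ reach d t, x ∈ C := by
  suffices h : ∀ n, ∀ x ∈ reachN d n t, x ∈ C by exact h _
  intro n
  induction n with
  | zero => intro x hx; exact ht x ((List.mem_dedup).1 hx)
  | succ n ih =>
      intro x hx
      rcases (mem_stepR_iff d _ x).1 hx with hx | ⟨a, ha, hx⟩
      · exact ih x hx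
      · exact hC a (ih a ha) x hx

-- ---- rank: size of the reachable set below a node; edges strictly decrease it ----
def rk (d : List (Int × List Int)) (c : Int) : Nat := (reach d (succsD d c)).length

theorem rank_lt (d : List (Int × List Int)) (R : List Int)
    (Hclosed : ∀ a ∈ R, ∀ b ∈ succsD d a, b ∈ R)
    (HA : ∀ c ∈ R, c ∉ reach d (succsD d c))
    (c c' : Int) (hc : c ∈ R) (hc' : c' ∈ succsD d c) : rk d c' < rk d c := by
  have hc'S : c' ∈ reach d (succsD d c) := reach_self d _ c' hc'
  have hc'R : c' ∈ R := Hclosed c hc c' hc'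
  have hc'notS' : c' ∉ reach d (succsD d c') := HA c' hc'R
  have hsub : ∀ x ∈ reach d (succsD d c'), x ∈ reach d (succsD d c) := by
    apply reach_minimal d (succsD d c') (reach d (succsD d c))
    · intro a ha b hb; exact reach_closed d _ a b ha hb
    · intro a ha; exact reach_closed d _ c' a hc'S ha
  have hss : (reach d (succsD d c')).toFinset ⊂ (reach d (succsD d c)).toFinset := by
    constructor
    · intro y hy
      exact List.mem_toFinset.2 (hsub y (List.mem_toFinset.1 hy))
    · intro hcon
      exact hc'notS' (List.mem_toFinset.1 (hcon (List.mem_toFinset.2 hc'S)))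
  have := Finset.card_lt_card hss
  unfold rk
  rwa [List.toFinset_card_of_nodup (reach_nodup d _),
       List.toFinset_card_of_nodup (reach_nodup d _)] at this

theorem rk_le (d : List (Int × List Int)) (R : List Int)
    (Hclosed : ∀ a ∈ R, ∀ b ∈ succsD d a, b ∈ R)
    (HK : ∀ a ∈ R, (pvGet d a).isSome = true)
    (c : Int) (hc : c ∈ R) : rk d c ≤ d.length := by
  have hsubR : ∀ x ∈ reach d (succsD d c), x ∈ R := by
    apply reach_minimal d (succsD d c) R Hclosed
    intro a ha; exact Hclosed c hc a ha
  have hkeys : ∀ x ∈ reach d (succsD d c), x ∈ d.map Prod.fst := by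
    intro x hx
    have := HK x (hsubR x hx)
    rcases hg : pvGet d x with _ | v
    · rw [hg] at this; simp at this
    · exact pvGet_some_key d x v hg
  have h1 : (reach d (succsD d c)).length ≤ (d.map Prod.fst).dedup.length :=
    nodup_length_le_dedup (reach_nodup d _) hkeys
  have h2 : (d.map Prod.fst).dedup.length ≤ (d.map Prod.fst).length :=
    List.Sublist.length_le (List.dedup_sublist _)
  unfold rk
  simp only [List.length_map] at h2
  omega

-- ---- unfolding equations for the fueled loops ----
theorem loopA_nil (F : Nat) (x y : Int) (acc : List (List Int)) (d : List (Int × List Int)) :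
    loopA F [] x y acc d = some acc := by rw [loopA]

theorem loopA_cons (F : Nat) (c : Int) (rest : List Int) (x y : Int) (acc : List (List Int))
    (d : List (Int × List Int)) :
    loopA F (c :: rest) x y acc d =
      match goA F (pvGet d c) x y (acc ++ [[x, y, c]]) d with
      | none => none
      | some acc2 => loopA F rest x (y + 1) acc2 d := by
  rw [loopA]

theorem goA_succ_some (F : Nat) (l : List Int) (x y : Int) (acc : List (List Int))
    (d : List (Int × List Int)) :
    goA (F + 1) (some l) x y acc d = if l = [] then some acc else loopA F l (x + 1) y acc d := by rw [goA]

theorem goB_nil (F : Nat) (acc : List (List Int)) (d : List (Int × List Int)) :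
    goB F [] acc d = some acc := by cases F <;> rw [goB]

theorem goB_succ (F : Nat) (x y node : Int) (st : List (Int × Int × Int))
    (acc : List (List Int)) (d : List (Int × List Int)) :
    goB (F + 1) ((x, y, node) :: st) acc d =
      match pvGet d node with
      | none => none
      | some children =>
          goB F (pvEnumStack (x + 1) y children ++ st) (acc ++ [[x, y, node]]) d := by rw [goB]

theorem pvGet_len_le (d : List (Int × List Int)) (c : Int) (v : List Int)
    (h : pvGet d c = some v) : v.length ≤ pvMaxLen d := by
  induction d with
  | nil => simp [pvGet] at h
  | cons p rest ih =>
      obtain ⟨k, w⟩ := p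
      by_cases hk : (k == c) = true
      · simp [pvGet, hk] at h
        simp [pvMaxLen, ← h]
      · simp only [pvGet, hk] at h
        have := ih h
        simp only [pvMaxLen, List.foldr_cons] at *
        omega

-- the one induction: inside Pre_, loopA returns, its visit count is bounded, and consuming the
-- corresponding stack block in goB computes the same accumulator
theorem main_lemma (d : List (Int × List Int)) (R : List Int)
    (Hclosed : ∀ a ∈ R, ∀ b ∈ succsD d a, b ∈ R)
    (HK : ∀ a ∈ R, (pvGet d a).isSome = true)
    (HA : ∀ c ∈ R, c ∉ reach d (succsD d c)) :
    ∀ (F : Nat) (l : List Int) (x y : Int) (acc : List (List Int)),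
      (∀ c ∈ l, c ∈ R ∧ rk d c < F) →
      ∃ acc', loopA F l x y acc d = some acc' ∧
        acc.length ≤ acc'.length ∧
        acc'.length - acc.length ≤ l.length * (pvMaxLen d + 1) ^ (F - 1) ∧
        ∀ G s, goB (G + (acc'.length - acc.length)) (pvEnumStack x y l ++ s) acc d
                 = goB G s acc' d := by
  intro F
  induction F with
  | zero =>
      intro l x y acc hl
      cases l with
      | nil =>
          exact ⟨acc, loopA_nil _ _ _ _ _, le_rfl, by simp, fun G s => by simp [pvEnumStack]⟩
      | cons c rest => exact absurd (hl c (by simp)).2 (by omega)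
  | succ F' ih =>
      intro l
      induction l with
      | nil =>
          intro x y acc hl
          exact ⟨acc, loopA_nil _ _ _ _ _, le_rfl, by simp, fun G s => by simp [pvEnumStack]⟩
      | cons c rest ihl =>
          intro x y acc hl
          have hc := hl c (by simp)
          have hcS : (pvGet d c).isSome = true := HK c hc.1
          rcases hg : pvGet d c with _ | cs
          · rw [hg] at hcS; simp at hcS
          · have hsucc : succsD d c = cs := by simp [succsD, hg]
            have Hc : ∀ ch ∈ cs, ch ∈ R ∧ rk d ch < F' := by
              intro ch hch
              have hchS : ch ∈ succsD d c := by rw [hsucc]; exact hch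
              refine ⟨Hclosed c hc.1 ch hchS, ?_⟩
              have := rank_lt d R Hclosed HA c ch hc.1 hchS
              omega
            by_cases hcs : cs = []
            · -- leaf: the recursive call returns immediately
              subst hcs
              obtain ⟨acc', hrun, hmono, hcount, hbridge⟩ :=
                ihl x (y + 1) (acc ++ [[x, y, c]]) (fun c' hc' => hl c' (by simp [hc']))
              refine ⟨acc', ?_, by simp at hmono ⊢; omega, ?_, ?_⟩
              · rw [loopA_cons, hg, goA_succ_some, if_pos rfl]
                exact hrun
              · have h1 : 1 ≤ (pvMaxLen d + 1) ^ F' := Nat.one_le_pow _ _ (by omega)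
                have e3 : (rest.length + 1) * (pvMaxLen d + 1) ^ F'
                    = rest.length * (pvMaxLen d + 1) ^ F' + (pvMaxLen d + 1) ^ F' := by ring
                simp only [List.length_append, List.length_cons, List.length_nil,
                  Nat.succ_sub_one] at hmono hcount ⊢
                omega
              · intro G s
                have hsplit : G + (acc'.length - acc.length)
                    = (G + (acc'.length - (acc ++ [[x, y, c]]).length)) + 1 := by
                  simp only [List.length_append, List.length_cons, List.length_nil] at hmono ⊢
                  omega
                rw [hsplit]
                show goB _ ((x, y, c) :: (pvEnumStack x (y + 1) rest ++ s)) acc d = _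
                rw [goB_succ, hg]
                exact hbridge G s
            · -- interior node: recurse into cs with fuel F'
              obtain ⟨acc2, h2run, h2mono, h2count, h2bridge⟩ :=
                ih cs (x + 1) y (acc ++ [[x, y, c]]) Hc
              obtain ⟨acc', h3run, h3mono, h3count, h3bridge⟩ :=
                ihl x (y + 1) acc2 (fun c' hc' => hl c' (by simp [hc']))
              refine ⟨acc', ?_, by simp at h2mono; omega, ?_, ?_⟩
              · rw [loopA_cons, hg, goA_succ_some, if_neg hcs, h2run]
                exact h3run
              · have hF1 : 1 ≤ F' := by
                  rcases cs with _ | ⟨ch, _⟩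
                  · exact absurd rfl hcs
                  · have := (Hc ch (by simp)).2
                    omega
                have hM : cs.length ≤ pvMaxLen d := pvGet_len_le d c cs hg
                have h1 : 1 ≤ (pvMaxLen d + 1) ^ (F' - 1) := Nat.one_le_pow _ _ (by omega)
                have hP : (pvMaxLen d + 1) ^ F' = (pvMaxLen d + 1) ^ (F' - 1) * (pvMaxLen d + 1) := by
                  rw [← pow_succ]
                  congr 1
                  omega
                have e1 : cs.length * (pvMaxLen d + 1) ^ (F' - 1)
                    ≤ pvMaxLen d * (pvMaxLen d + 1) ^ (F' - 1) := Nat.mul_le_mul_right _ hM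
                have e2 : pvMaxLen d * (pvMaxLen d + 1) ^ (F' - 1) + (pvMaxLen d + 1) ^ (F' - 1)
                    = (pvMaxLen d + 1) ^ F' := by rw [hP]; ring
                have e3 : (rest.length + 1) * (pvMaxLen d + 1) ^ F'
                    = rest.length * (pvMaxLen d + 1) ^ F' + (pvMaxLen d + 1) ^ F' := by ring
                simp only [List.length_append, List.length_cons, List.length_nil,
                  Nat.succ_sub_one] at h2mono h2count h3count ⊢
                omega
              · intro G s
                have hb2 := h2bridge (G + (acc'.length - acc2.length)) (pvEnumStack x (y + 1) rest ++ s)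
                have hb3 := h3bridge G s
                have hsplit : G + (acc'.length - acc.length)
                    = ((G + (acc'.length - acc2.length)) + (acc2.length - (acc ++ [[x, y, c]]).length)) + 1 := by
                  simp only [List.length_append, List.length_cons, List.length_nil] at h2mono h3mono ⊢
                  omega
                rw [hsplit]
                show goB _ ((x, y, c) :: (pvEnumStack x (y + 1) rest ++ s)) acc d = _
                rw [goB_succ, hg]
                exact hb2.trans hb3

-- ===== VERDICT (by name: the statement is the Claim_ definition above) =====
theorem filter_axis_spec : Claim_equal_filter_axis := by
  intro cl x y acc d check _ hpre
  unfold Spec_filter_axis filter_axis filter_axis_alt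
  by_cases hcl : cl = []
  · simp [hcl]
  · rcases hpre with hpre | ⟨HK, HA⟩
    · exact absurd hpre hcl
    · have Hclosed : ∀ a ∈ reach d cl, ∀ b ∈ succsD d a, b ∈ reach d cl :=
        fun a ha b hb => reach_closed d cl a b ha hb
      obtain ⟨acc', hrun, hmono, hcount, hbridge⟩ :=
        main_lemma d (reach d cl) Hclosed HK HA (d.length + 1) cl (x + 1) y acc (by
          intro c hc
          have hcR : c ∈ reach d cl := reach_self d cl c hc
          exact ⟨hcR, by have := rk_le d (reach d cl) Hclosed HK c hcR; omega⟩)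
      rw [if_neg hcl, if_neg hcl, hrun]
      have hle : acc'.length - acc.length ≤ cl.length * (pvMaxLen d + 1) ^ d.length := by
        simpa using hcount
      have := hbridge (cl.length * (pvMaxLen d + 1) ^ d.length + 1 - (acc'.length - acc.length)) []
      rw [List.append_nil] at this
      have harith : cl.length * (pvMaxLen d + 1) ^ d.length + 1 - (acc'.length - acc.length)
          + (acc'.length - acc.length) = cl.length * (pvMaxLen d + 1) ^ d.length + 1 := by omega
      rw [harith] at this
      rw [this]
      exact (goB_nil _ _ _).symm
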